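-- pv_equiv track=rewrite | github.com/rajgandhi1/goodrich | core/parser.py | _infer_line_no_col
-- ===== SOURCE A (Python) =====
-- def _infer_line_no_col(data_rows: list[tuple], desc_col: int | None) -> int | None:
--     """Infer a serial-number column immediately to the left of Description."""
--     if desc_col is None or desc_col <= 0:
--         return None
--     best_col = None
--     best_count = 0
--     for col_idx in range(desc_col):
--         count = 0
--         for row in data_rows[:25]:
--             if _cell_float(row, col_idx) is not None:
--                 count += 1
--         if count > best_count:
--             best_col = col_idx
--             best_count = count
--     return best_col if best_count >= 1 else None
--
-- def _cell_float(row: tuple, idx: int | None) -> float | None: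
--     if idx is None or idx >= len(row):
--         return None
--     try:
--         return float(row[idx])
--     except (TypeError, ValueError):
--         return None
-- ===== SOURCE B (Python) =====
-- def _infer_line_no_col(data_rows, desc_col):
--     """Flatten the first 25 rows into a list of column indices of numeric cells,
--     hash-count them, then pick the smallest column among those with the top count."""
--     if desc_col is None or desc_col <= 0:
--         return None
--     numeric_cols = [col
--                     for row in data_rows[:25]
--                     for col, cell in enumerate(row[:desc_col])
--                     if _is_numeric(cell)]
--     if not numeric_cols:
--         return None
--     hits = {}
--     for col in numeric_cols:
--         hits[col] = hits.get(col, 0) + 1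
--     top = max(hits.values())
--     return min(col for col, n in hits.items() if n == top)
--
--
-- def _is_numeric(cell):
--     try:
--         float(cell)
--         return True
--     except (TypeError, ValueError):
--         return False
-- ===== Notes on version B (the rewrite author's own statement) =====
-- stated objective: faster
-- what changed: B flattens the first 25 rows into one list of column indices of numeric cells, tallies it in a dict, takes the maximal tally and returns the minimal column achieving it, instead of A's per-column rescans of the table with a running left-argmax.
import Mathlib
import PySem

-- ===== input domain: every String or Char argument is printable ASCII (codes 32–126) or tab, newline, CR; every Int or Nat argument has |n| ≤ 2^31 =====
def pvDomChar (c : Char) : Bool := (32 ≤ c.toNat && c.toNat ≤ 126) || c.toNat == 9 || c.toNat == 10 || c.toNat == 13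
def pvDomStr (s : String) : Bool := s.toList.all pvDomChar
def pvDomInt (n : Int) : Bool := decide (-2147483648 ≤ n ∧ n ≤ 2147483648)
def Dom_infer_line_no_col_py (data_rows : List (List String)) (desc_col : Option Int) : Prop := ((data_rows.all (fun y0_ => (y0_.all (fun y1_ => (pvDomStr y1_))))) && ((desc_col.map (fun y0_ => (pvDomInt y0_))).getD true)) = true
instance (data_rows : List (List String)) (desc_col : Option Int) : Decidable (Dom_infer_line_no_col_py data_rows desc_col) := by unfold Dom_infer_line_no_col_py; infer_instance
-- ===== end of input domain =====

-- B replaces A's per-column rescans with a running left-argmax by a flattened occurrence list of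
-- numeric-cell column indices, a dict tally of it, and a max-count / min-column selection.

-- ===== shared helper: `float(s)` acceptance test =====
-- Python's float() literal grammar on the printable-ASCII domain: optional sign, then
-- inf/infinity/nan (case-insensitive) or digits with one optional '.', optional exponent,
-- single '_' only between digits.  Exact on the stated ASCII domain (fuzzed against CPython).
def pvDigRunRest : List Char → Bool
  | [] => true
  | c :: rest =>
    if c = '_' then (match rest with | [] => false | d :: _ => d.isDigit) && pvDigRunRest rest
    else c.isDigit && pvDigRunRest rest

def pvDigRun : List Char → Bool
  | [] => false
  | c :: rest => c.isDigit && pvDigRunRest rest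

def pvMantOk (m : List Char) : Bool :=
  let a := m.takeWhile (· ≠ '.')
  match m.dropWhile (· ≠ '.') with
  | [] => pvDigRun m
  | _ :: b =>
    (!(b.contains '.')) &&
      (if a.isEmpty then pvDigRun b else pvDigRun a && (b.isEmpty || pvDigRun b))

def pvSignedDigRun : List Char → Bool
  | [] => false
  | c :: rest => if c = '+' ∨ c = '-' then pvDigRun rest else pvDigRun (c :: rest)

def pvFloatBody (t : List Char) : Bool :=
  let m := t.takeWhile (fun c => ¬ (c = 'e' ∨ c = 'E'))
  match t.dropWhile (fun c => ¬ (c = 'e' ∨ c = 'E')) with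
  | [] => pvMantOk m
  | _ :: e => pvMantOk m && pvSignedDigRun e

def pvFloatOk (s : String) : Bool :=
  match PySem.Chars.strip s.toList with
  | [] => false
  | c :: rest =>
    let t := if c = '+' ∨ c = '-' then rest else c :: rest
    (PySem.Chars.lower t = "inf".toList || PySem.Chars.lower t = "infinity".toList ||
      PySem.Chars.lower t = "nan".toList) || pvFloatBody t

-- ===== PORT A =====
-- _cell_float, ported as its only observed aspect "is the result not None" (the float value
-- itself is never used; the idx passed is always a nonnegative in-range int here).
def cell_float_isSome (row : List String) (idx : Int) : Bool :=
  if (row.length : Int) ≤ idx then false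
  else
    match PySem.List.pyGet? row idx with
    | some s => pvFloatOk s
    | none => false

def infer_line_no_col_py (data_rows : List (List String)) (desc_col : Option Int) : Option Int :=
  match desc_col with
  | none => none
  | some d =>
    if d ≤ 0 then none
    else
      let st := (PySem.List.pyRange 0 d 1).foldl
        (fun (st : Option Int × Int) col =>
          let count := (PySem.List.slice data_rows none (some 25)).foldl
            (fun c row => if cell_float_isSome row col then c + 1 else c) 0
          if st.2 < count then (some col, count) else st)
        (none, 0)
      if 1 ≤ st.2 then st.1 else none

-- ===== PORT B =====
-- _is_numeric(cell): "float(cell) succeeds" (same float() grammar helper as A's _cell_float).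
def is_numeric (cell : String) : Bool := pvFloatOk cell

def infer_line_no_col_py_alt (data_rows : List (List String)) (desc_col : Option Int) : Option Int :=
  match desc_col with
  | none => none
  | some d =>
    if d ≤ 0 then none
    else
      let numeric_cols := (PySem.List.slice data_rows none (some 25)).flatMap
        (fun row => ((PySem.List.enumerate (PySem.List.slice row none (some d))).filter
            (fun p => is_numeric p.2)).map Prod.fst)
      if numeric_cols = [] then none
      else
        let hits := numeric_cols.foldl
          (fun (h : PySem.Dict Int Int) col => h.insert col (h.getD col 0 + 1)) PySem.Dict.empty
        match PySem.List.max? hits.values (fun v => v) with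
        | none => none      -- unreachable: hits is nonempty here
        | some top =>
          match PySem.List.min? ((hits.items.filter (fun p => p.2 == top)).map Prod.fst)
              (fun c => c) with
          | none => none    -- unreachable: top is a value of hits
          | some c => some c

-- ===== PRECONDITION & SPEC =====
def Spec_infer_line_no_col_py (data_rows : List (List String)) (desc_col : Option Int) (out : Option Int) : Prop := out = infer_line_no_col_py_alt data_rows desc_col
instance (data_rows : List (List String)) (desc_col : Option Int) (out : Option Int) : Decidable (Spec_infer_line_no_col_py data_rows desc_col out) := by unfold Spec_infer_line_no_col_py; infer_instance

-- ===== CLAIM (what is proved, stated in full; the proofs are below) =====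
def Claim_equal_infer_line_no_col_py : Prop := ∀ (data_rows : List (List String)) (desc_col : Option Int), Dom_infer_line_no_col_py data_rows desc_col → Spec_infer_line_no_col_py data_rows desc_col (infer_line_no_col_py data_rows desc_col)

-- ===== LEMMAS AND PROOFS =====

-- A's per-column count, and B's flattened occurrence list, as named objects of the proof.
def pvCnt (rows : List (List String)) (c : Int) : Int :=
  rows.foldl (fun n row => if cell_float_isSome row c then n + 1 else n) 0

def pvFlat (rows : List (List String)) (d : Int) : List Int :=
  rows.flatMap (fun row => ((PySem.List.enumerate (PySem.List.slice row none (some d))).filter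
      (fun p => is_numeric p.2)).map Prod.fst)

theorem pvCnt_def (rows : List (List String)) (c : Int) :
    rows.foldl (fun n row => if cell_float_isSome row c then n + 1 else n) 0 = pvCnt rows c := rfl

theorem pvFlat_def (rows : List (List String)) (d : Int) :
    rows.flatMap (fun row => ((PySem.List.enumerate (PySem.List.slice row none (some d))).filter
      (fun p => is_numeric p.2)).map Prod.fst) = pvFlat rows d := rfl

-- A's argmax scan characterised: final best count is the running max, final best column is the
-- FIRST column attaining it (or the initial best if nothing exceeded the initial count).
theorem pvScan (cnt : Int → Int) :
    ∀ (l : List Int) (b : Option Int) (m : Int),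
      l.foldl (fun st c => if st.2 < cnt c then (some c, cnt c) else st) (b, m)
        = (if l.foldl (fun a c => max a (cnt c)) m = m then b
           else l.find? (fun c => cnt c == l.foldl (fun a c => max a (cnt c)) m),
           l.foldl (fun a c => max a (cnt c)) m) := by
  intro l
  induction l with
  | nil => intro b m; simp
  | cons c t ih =>
    intro b m
    simp only [List.foldl_cons]
    by_cases h : m < cnt c
    · rw [if_pos h, max_eq_right (le_of_lt h), ih]
      have hle : cnt c ≤ t.foldl (fun a c => max a (cnt c)) (cnt c) :=
        (PySem.List.le_foldl_max_int t cnt (cnt c)).1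
      have hne : t.foldl (fun a c => max a (cnt c)) (cnt c) ≠ m := by omega
      by_cases he : t.foldl (fun a c => max a (cnt c)) (cnt c) = cnt c
      · simp [he]
        intro hcm
        exact absurd hcm (by omega)
      · have hne2 : cnt c ≠ t.foldl (fun a c => max a (cnt c)) (cnt c) := fun hh => he hh.symm
        simp [hne, he, hne2]
    · rw [if_neg h, max_eq_left (by omega), ih]
      by_cases he : t.foldl (fun a c => max a (cnt c)) m = m
      · rw [if_pos he, if_pos he]
      · have hm : m ≤ t.foldl (fun a c => max a (cnt c)) m :=
          (PySem.List.le_foldl_max_int t cnt m).1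
        have hne2 : cnt c ≠ t.foldl (fun a c => max a (cnt c)) m := by omega
        simp [he, hne2]

-- find? on a strictly increasing list returns the least satisfying element.
theorem pvFindMin {p : Int → Bool} :
    ∀ {l : List Int}, l.Pairwise (· < ·) → ∀ {x : Int}, l.find? p = some x →
      ∀ y ∈ l, p y = true → x ≤ y := by
  intro l
  induction l with
  | nil => intro _ x hx; simp at hx
  | cons a t ih =>
    intro hpw x hx y hy hpy
    have hpw' := List.pairwise_cons.mp hpw
    by_cases ha : p a = true
    · rw [List.find?_cons_of_pos ha] at hx
      cases hx
      rcases List.mem_cons.mp hy with rfl | hyt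
      · exact le_refl _
      · exact le_of_lt (hpw'.1 y hyt)
    · rw [List.find?_cons_of_neg (by simpa using ha)] at hx
      rcases List.mem_cons.mp hy with rfl | hyt
      · exact absurd hpy ha
      · exact ih hpw'.2 hx y hyt hpy

-- Per-row count: in the numeric-column list of one row slice, a column index c occurs once
-- iff c indexes a numeric cell of the slice, else not at all.
theorem pvRowCount (s : List String) :
    ∀ (k c : Int),
      ((((PySem.List.enumerate s k).filter (fun p => is_numeric p.2)).map Prod.fst).count c)
        = if k ≤ c ∧ c < k + s.length ∧ is_numeric (s.getD (c - k).toNat "") then 1 else 0 := by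
  induction s with
  | nil =>
    intro k c
    simp only [PySem.List.enumerate, List.filter_nil, List.map_nil, List.count_nil,
      List.length_nil]
    rw [if_neg (by rintro ⟨h1, h2, _⟩; omega)]
  | cons x xs ih =>
    intro k c
    rw [PySem.List.enumerate_cons]
    have hiff : k ≠ c →
        ((k + 1 ≤ c ∧ c < k + 1 + (xs.length : Int) ∧
            is_numeric (xs.getD (c - (k + 1)).toNat "") = true)
          ↔ (k ≤ c ∧ c < k + ((x :: xs).length : Int) ∧
            is_numeric ((x :: xs).getD (c - k).toNat "") = true)) := by
      intro hkc
      constructor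
      · rintro ⟨h1, h2, h3⟩
        refine ⟨by omega, by simp only [List.length_cons]; push_cast; omega, ?_⟩
        rw [show (c - k).toNat = (c - (k + 1)).toNat + 1 from by omega, List.getD_cons_succ]
        exact h3
      · rintro ⟨h1, h2, h3⟩
        have h1' : k + 1 ≤ c := by omega
        rw [show (c - k).toNat = (c - (k + 1)).toNat + 1 from by omega,
          List.getD_cons_succ] at h3
        refine ⟨h1', by simp only [List.length_cons] at h2; push_cast at h2 ⊢; omega, h3⟩
    by_cases hx : is_numeric x
    · rw [List.filter_cons_of_pos (by simpa using hx), List.map_cons, List.count_cons,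
        ih (k + 1) c]
      have hfst : ((k : Int), x).1 = k := rfl
      rw [hfst]
      by_cases hkc : k = c
      · subst hkc
        have hP : k ≤ k ∧ k < k + ((x :: xs).length : Int) ∧
            is_numeric ((x :: xs).getD ((k - k).toNat) "") = true :=
          ⟨le_refl k, by simp only [List.length_cons]; push_cast; omega,
            by rw [show (k - k).toNat = 0 from by omega, List.getD_cons_zero]; exact hx⟩
        have hP1 : ¬ (k + 1 ≤ k ∧ k < k + 1 + (xs.length : Int) ∧
            is_numeric (xs.getD ((k - (k + 1)).toNat) "") = true) :=
          fun hh => absurd hh.1 (by omega)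
        rw [if_pos hP, if_neg hP1, if_pos (beq_self_eq_true k)]
      · have hb : ¬ ((k == c) = true) := by simp [hkc]
        rw [if_neg hb, if_congr (hiff hkc) rfl rfl]
        simp
    · rw [List.filter_cons_of_neg (by simpa using hx), ih (k + 1) c]
      by_cases hkc : k = c
      · subst hkc
        have hP1 : ¬ (k + 1 ≤ k ∧ k < k + 1 + (xs.length : Int) ∧
            is_numeric (xs.getD ((k - (k + 1)).toNat) "") = true) :=
          fun hh => absurd hh.1 (by omega)
        have hP : ¬ (k ≤ k ∧ k < k + ((x :: xs).length : Int) ∧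
            is_numeric ((x :: xs).getD ((k - k).toNat) "") = true) :=
          fun hh => hx (by
            have h3 := hh.2.2
            rwa [show (k - k).toNat = 0 from by omega, List.getD_cons_zero] at h3)
        rw [if_neg hP1, if_neg hP]
      · rw [if_congr (hiff hkc) rfl rfl]

-- Bridge: A's count of a column equals the multiplicity of that column in B's flattened list.
theorem pvCnt_eq_count (rows : List (List String)) (d c : Int) (h0 : 0 ≤ c) (hd : c < d) :
    pvCnt rows c = ((pvFlat rows d).count c : Int) := by
  unfold pvCnt pvFlat
  rw [PySem.List.foldl_count_if, List.count_flatMap]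
  have hrow : ∀ row : List String,
      (List.count c ∘ fun row => ((PySem.List.enumerate (PySem.List.slice row none (some d))).filter
        (fun p => is_numeric p.2)).map Prod.fst) row
      = if cell_float_isSome row c then 1 else 0 := by
    intro row
    have hdnn : (0:Int) ≤ d := by omega
    simp only [Function.comp_apply]
    rw [PySem.List.slice_to row hdnn, pvRowCount (row.take d.toNat) 0 c]
    by_cases hlen : (row.length : Int) ≤ c
    · have hcf : cell_float_isSome row c = false := by
        unfold cell_float_isSome
        rw [if_pos hlen]
      rw [hcf, if_neg (by
        rintro ⟨_, h2, _⟩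
        have h3 : (row.take d.toNat).length ≤ row.length := List.length_take_le' d.toNat row
        omega)]
      simp
    · have hlt : c < (row.length : Int) := by omega
      have hcl : c.toNat < (row.take d.toNat).length := by
        rw [List.length_take]; omega
      have hcell : cell_float_isSome row c = pvFloatOk (row[c.toNat]) := by
        unfold cell_float_isSome
        rw [if_neg hlen, PySem.List.pyGet?_eq_some_getElem row h0 hlt]
      have hgd : (row.take d.toNat).getD (c - 0).toNat "" = row[c.toNat] := by
        rw [sub_zero, List.getD_eq_getElem _ _ hcl, List.getElem_take]
      rw [hcell]
      by_cases hn : pvFloatOk (row[c.toNat]) = true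
      · rw [if_pos (show (0:Int) ≤ c ∧ c < 0 + ((row.take d.toNat).length : Int) ∧
            is_numeric ((row.take d.toNat).getD (c - 0).toNat "") = true from
            ⟨h0, by rw [List.length_take]; push_cast; omega, by rw [hgd]; exact hn⟩),
          if_pos hn]
      · rw [if_neg (show ¬ ((0:Int) ≤ c ∧ c < 0 + ((row.take d.toNat).length : Int) ∧
            is_numeric ((row.take d.toNat).getD (c - 0).toNat "") = true) from by
            rintro ⟨_, _, h3⟩
            rw [hgd] at h3
            exact hn h3),
          if_neg hn]
  rw [List.map_congr_left (fun row _ => hrow row), PySem.List.sum_map_ite_one_zero_nat]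
  omega

-- Every entry of the flattened list is a column index in [0, d).
theorem pvFlat_bounds (rows : List (List String)) (d : Int) (hd : 0 ≤ d) :
    ∀ c ∈ pvFlat rows d, 0 ≤ c ∧ c < d := by
  intro c hc
  unfold pvFlat at hc
  rcases List.mem_flatMap.mp hc with ⟨row, _, hmem⟩
  rcases List.mem_map.mp hmem with ⟨p, hp, rfl⟩
  have hp' := List.mem_filter.mp hp
  rcases (PySem.List.mem_enumerate_iff _ _ _).mp hp'.1 with ⟨k, hk, rfl⟩
  rw [PySem.List.slice_to row hd] at hk
  rw [List.length_take] at hk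
  constructor
  · simp
  · simp only [zero_add]
    have : k < d.toNat := by omega
    omega

theorem pv_main (data_rows : List (List String)) (desc_col : Option Int) :
    infer_line_no_col_py data_rows desc_col = infer_line_no_col_py_alt data_rows desc_col := by
  cases desc_col with
  | none => rfl
  | some d =>
    by_cases hd : d ≤ 0
    · simp [infer_line_no_col_py, infer_line_no_col_py_alt, hd]
    · simp only [infer_line_no_col_py, infer_line_no_col_py_alt, if_neg hd]
      have hd' : 0 < d := by omega
      set rows := PySem.List.slice data_rows none (some 25) with hrows
      have hA := pvScan (pvCnt rows) (PySem.List.pyRange 0 d 1) none 0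
      simp only [pvCnt] at hA
      rw [hA]
      simp only [pvCnt_def, pvFlat_def]
      set M := (PySem.List.pyRange 0 d 1).foldl (fun a c => max a (pvCnt rows c)) 0 with hM
      set flat := pvFlat rows d with hflatdef
      by_cases hflat : flat = []
      · -- no numeric cell anywhere: every count is 0, M = 0, both return none
        rw [if_pos hflat]
        have hzero : ∀ c ∈ PySem.List.pyRange 0 d 1, pvCnt rows c = 0 := by
          intro c hc
          rcases PySem.List.mem_pyRange_one.mp hc with ⟨h1, h2⟩
          rw [pvCnt_eq_count rows d c h1 h2, ← hflatdef, hflat]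
          simp
        have hM0 : M = 0 := by
          rw [hM, ← List.foldl_map (f := fun c => pvCnt rows c) (g := max)]
          rcases PySem.List.foldl_max_mem ((PySem.List.pyRange 0 d 1).map (pvCnt rows)) 0 with
            h | h
          · exact h
          · rcases List.mem_map.mp h with ⟨c, hc, hceq⟩
            rw [← hceq]; exact hzero c hc
        have : ¬ (1 : Int) ≤ (if M = 0 then none else (PySem.List.pyRange 0 d 1).find?
            (fun c => pvCnt rows c == M), M).2 := by
          simp only [hM0]; omega
        rw [if_neg this]
      · -- some numeric cell: M = top ≥ 1 and both pick the least column of count M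
        rw [if_neg hflat]
        rw [PySem.Dict.foldl_insert_getD_add_one_eq_counter]
        rcases List.exists_mem_of_ne_nil flat hflat with ⟨c0, hc0⟩
        have hb0 := pvFlat_bounds rows d (by omega) c0 (by rwa [hflatdef] at hc0)
        have hcnt0 : 1 ≤ pvCnt rows c0 := by
          rw [pvCnt_eq_count rows d c0 hb0.1 hb0.2, ← hflatdef]
          have := List.count_pos_iff.mpr hc0
          omega
        have hMc0 : pvCnt rows c0 ≤ M := by
          rw [hM]
          exact (PySem.List.le_foldl_max_int _ _ _).2 c0
            (PySem.List.mem_pyRange_one.mpr ⟨hb0.1, hb0.2⟩)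
        have hM1 : 1 ≤ M := le_trans hcnt0 hMc0
        have hattain : ∃ c ∈ PySem.List.pyRange 0 d 1, pvCnt rows c = M := by
          have hh : M = 0 ∨ M ∈ (PySem.List.pyRange 0 d 1).map (pvCnt rows) := by
            rw [hM, ← List.foldl_map (f := fun c => pvCnt rows c) (g := max)]
            exact PySem.List.foldl_max_mem _ 0
          rcases hh with h | h
          · omega
          · rcases List.mem_map.mp h with ⟨c, hc, hceq⟩
            exact ⟨c, hc, hceq⟩
        rcases hattain with ⟨cstar, hcstar_mem, hcstar⟩
        rcases PySem.List.mem_pyRange_one.mp hcstar_mem with ⟨hcs0, hcsd⟩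
        have hcstar_cnt : ((flat.count cstar : Int)) = M := by
          rw [hflatdef, ← pvCnt_eq_count rows d cstar hcs0 hcsd]; exact hcstar
        have hcstar_flat : cstar ∈ flat := by
          apply List.count_pos_iff.mp
          omega
        have hvals : (PySem.Dict.counter flat).values
            = (PySem.Set.ofList flat).map (fun k => ((flat.count k : Int))) := by
          show ((PySem.Dict.counter flat).items.map Prod.snd) = _
          rw [PySem.Dict.items_counter, List.map_map]
          rfl
        have hvne : (PySem.Dict.counter flat).values ≠ [] := by
          rw [hvals]
          simp only [ne_eq, List.map_eq_nil_iff]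
          intro h
          have := (PySem.Set.mem_ofList flat cstar).mpr hcstar_flat
          rw [h] at this
          simp at this
        obtain ⟨top, htop⟩ : ∃ top, PySem.List.max? (PySem.Dict.counter flat).values
            (fun v => v) = some top := by
          cases h : PySem.List.max? (PySem.Dict.counter flat).values (fun v => v) with
          | none => exact absurd ((PySem.List.max?_eq_none_iff _ _).mp h) hvne
          | some t => exact ⟨t, rfl⟩
        rw [htop]
        simp only []
        have htopM : top = M := by
          have h1 : top ≤ M := by
            have hmem := PySem.List.max?_mem htop
            rw [hvals] at hmem
            rcases List.mem_map.mp hmem with ⟨k, hk, hkeq⟩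
            have hkflat := (PySem.Set.mem_ofList flat k).mp hk
            have hbk := pvFlat_bounds rows d (by omega) k (by rwa [hflatdef] at hkflat)
            rw [← hkeq, hflatdef, ← pvCnt_eq_count rows d k hbk.1 hbk.2, hM]
            exact (PySem.List.le_foldl_max_int _ _ _).2 k
              (PySem.List.mem_pyRange_one.mpr ⟨hbk.1, hbk.2⟩)
          have h2 : M ≤ top := by
            have hmemv : ((flat.count cstar : Int)) ∈ (PySem.Dict.counter flat).values := by
              rw [hvals]
              exact List.mem_map.mpr ⟨cstar, (PySem.Set.mem_ofList flat cstar).mpr hcstar_flat,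
                rfl⟩
            have := PySem.List.max?_isMax htop _ hmemv
            omega
          omega
        set cl := (((PySem.Dict.counter flat).items.filter (fun p => p.2 == top)).map Prod.fst)
          with hcl
        have hclmem : ∀ c, c ∈ cl ↔ (c ∈ flat ∧ ((flat.count c : Int)) = top) := by
          intro c
          rw [hcl]
          constructor
          · intro hc
            rcases List.mem_map.mp hc with ⟨p, hp, rfl⟩
            have hp' := List.mem_filter.mp hp
            rw [PySem.Dict.items_counter] at hp'
            rcases List.mem_map.mp hp'.1 with ⟨k, hk, hkeq⟩
            have h2 := hp'.2
            rw [← hkeq] at h2 ⊢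
            simp only [beq_iff_eq] at h2
            exact ⟨(PySem.Set.mem_ofList flat k).mp hk, h2⟩
          · rintro ⟨hcf, hcc⟩
            apply List.mem_map.mpr
            refine ⟨(c, ((flat.count c : Int))), ?_, rfl⟩
            apply List.mem_filter.mpr
            refine ⟨?_, by simpa using hcc⟩
            rw [PySem.Dict.items_counter]
            exact List.mem_map.mpr ⟨c, (PySem.Set.mem_ofList flat c).mpr hcf, rfl⟩
        have hclne : cl ≠ [] := by
          intro h
          have : cstar ∈ cl := (hclmem cstar).mpr ⟨hcstar_flat, by rw [hcstar_cnt, htopM]⟩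
          rw [h] at this
          simp at this
        obtain ⟨m, hm⟩ : ∃ m, PySem.List.min? cl (fun c => c) = some m := by
          cases h : PySem.List.min? cl (fun c => c) with
          | none => exact absurd ((PySem.List.min?_eq_none_iff _ _).mp h) hclne
          | some t => exact ⟨t, rfl⟩
        rw [hm]
        simp only []
        have hmcl := (hclmem m).mp (PySem.List.min?_mem hm)
        have hbm := pvFlat_bounds rows d (by omega) m hmcl.1
        have hmcnt : pvCnt rows m = M := by
          rw [pvCnt_eq_count rows d m hbm.1 hbm.2, ← hflatdef, hmcl.2, htopM]
        obtain ⟨x, hx⟩ : ∃ x, (PySem.List.pyRange 0 d 1).find?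
            (fun c => pvCnt rows c == M) = some x := by
          cases h : (PySem.List.pyRange 0 d 1).find? (fun c => pvCnt rows c == M) with
          | none =>
            exfalso
            have := List.find?_eq_none.mp h m (PySem.List.mem_pyRange_one.mpr ⟨hbm.1, hbm.2⟩)
            simp [hmcnt] at this
          | some t => exact ⟨t, rfl⟩
        have hxp : pvCnt rows x = M := by simpa using List.find?_some hx
        have hxmem := List.mem_of_find?_eq_some hx
        rcases PySem.List.mem_pyRange_one.mp hxmem with ⟨hx0, hxd⟩
        have hxm : x ≤ m :=
          pvFindMin (PySem.List.pairwise_lt_pyRange_one 0 d) hx m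
            (PySem.List.mem_pyRange_one.mpr ⟨hbm.1, hbm.2⟩) (by simp [hmcnt])
        have hxcl : x ∈ cl := by
          apply (hclmem x).mpr
          have hxcount : ((flat.count x : Int)) = M := by
            rw [hflatdef, ← pvCnt_eq_count rows d x hx0 hxd]; exact hxp
          refine ⟨List.count_pos_iff.mp (by omega), by rw [hxcount, htopM]⟩
        have hmx : m ≤ x := PySem.List.min?_isMin hm x hxcl
        have hxem : x = m := le_antisymm hxm hmx
        rw [if_pos hM1, if_neg (show ¬ M = 0 from by omega), hx, hxem]

-- ===== VERDICT (by name: the statement is the Claim_ definition above) =====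
theorem infer_line_no_col_py_spec : Claim_equal_infer_line_no_col_py := by
  intro data_rows desc_col _
  exact pv_main data_rows desc_col
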